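-- pv_equiv track=rewrite | github.com/PHoltzman/interactive-christmas | Lights.py | shift_packet
-- ===== SOURCE A (Python) =====
-- def shift_packet(packet, pixels_to_shift, right=False, left=False, up=False, down=False, forward=False, backward=False):
-- 	if pixels_to_shift == 0:
-- 		return packet
--
-- 	# get packet dimensions
-- 	D = len(packet)
-- 	H = len(packet[0])
-- 	L = len(packet[0][0])
--
-- 	# left right is easiest since packet structure is laid out best for that
-- 	if right or left and L > 1:
-- 		pixels_to_shift_L = pixels_to_shift % L if pixels_to_shift >= L else pixels_to_shift
-- 		num = -1 * pixels_to_shift_L if right else pixels_to_shift_L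
--
-- 		new_packet = []
-- 		for grid in packet:
-- 			new_grid = []
-- 			for row in grid:
-- 				new_grid.append(row[num:] + row[:num])
-- 			new_packet.append(new_grid)
-- 		packet = new_packet
--
-- 	# for up down shifting, need to rearrange each grid to do the shift
-- 	if up or down and H > 1:
-- 		pixels_to_shift_H = pixels_to_shift % H if pixels_to_shift >= H else pixels_to_shift
-- 		num = -1 * pixels_to_shift_H if up else pixels_to_shift_H
--
-- 		'''
-- 		init = [
-- 			[A, B, C, D, E, F],
-- 			[G, H, I, J, K, L],
-- 			[M, N, O, P, Q, R],
-- 			[S, T, U, V, W, X]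
-- 		]
--
-- 		trans = [
-- 			[A, G, M, S],
-- 			[B, H, N, T],
-- 			[C, I, O, U],
-- 			[D, J, P, V],
-- 			[E, K, Q, W],
-- 			[F, L, R, X]
-- 		]
--
-- 		shifted = [
-- 			[G, M, S, A],
-- 			[H, N, T, B],
-- 			[I, O, U, C],
-- 			[J, P, V, D],
-- 			[K, Q, W, E],
-- 			[L, R, X, F]
-- 		]
-- 		'''
--
-- 		new_packet = []
-- 		for grid in packet:
-- 			t_grid = []		# H x L
-- 			new_grid = []
-- 			for x in range(L):
-- 				t_col = [row[x] for row in grid]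
-- 				shifted = t_col[num:] + t_col[:num]
-- 				t_grid.append(shifted)
--
-- 			for x in range(H):
-- 				row = [t_col[x] for t_col in t_grid]
-- 				new_grid.append(row)
-- 			new_packet.append(new_grid)
-- 		packet = new_packet
--
--
-- 	# for forward backward shifting, need to completely rearrange the whole packet to do the shift
-- 	if forward or backward and D > 1:
-- 		pixels_to_shift_D = pixels_to_shift % D if pixels_to_shift >= D else pixels_to_shift
-- 		num = -1 * pixels_to_shift_D if forward else pixels_to_shift_D
--
-- 		new_packet = []
-- 		t_packet = []	# L x H x D
-- 		for x in range(L):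
-- 			t_slice = []	# list of line lists
-- 			for h in range(H):
-- 				t_line = [packet[d][h][x] for d in range(D)]
-- 				shifted = t_line[num:] + t_line[:num]
-- 				t_slice.append(shifted)
-- 			t_packet.append(t_slice)
--
-- 		for d in range(D):
-- 			new_grid = []
-- 			for h in range(H):
-- 				new_row = [t_packet[x][h][d] for x in range(L)]
-- 				new_grid.append(new_row)
-- 			new_packet.append(new_grid)
-- 		packet = new_packet
--
-- 	return packet
-- ===== SOURCE B (Python) =====
-- def _amount(pixels_to_shift, size, neg):
-- 	n = pixels_to_shift % size if pixels_to_shift >= size else pixels_to_shift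
-- 	return -n if neg else n
--
-- def _rot(lst, num):
-- 	return lst[num:] + lst[:num]
--
-- def _window(grid, H, L):
-- 	return [[grid[h][x] for x in range(L)] for h in range(H)]
--
-- def shift_packet(packet, pixels_to_shift, right=False, left=False, up=False, down=False, forward=False, backward=False):
-- 	if pixels_to_shift == 0:
-- 		return packet
--
-- 	D = len(packet)
-- 	H = len(packet[0])
-- 	L = len(packet[0][0])
--
-- 	if right or left and L > 1:
-- 		num = _amount(pixels_to_shift, L, right)
-- 		packet = [[_rot(row, num) for row in grid] for grid in packet]
--
-- 	if up or down and H > 1: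
-- 		num = _amount(pixels_to_shift, H, up)
-- 		packet = [_window(_rot(grid, num), H, L) for grid in packet]
--
-- 	if forward or backward and D > 1:
-- 		num = _amount(pixels_to_shift, D, forward)
-- 		q = _rot(packet, num)
-- 		packet = [_window(q[d], H, L) for d in range(D)]
--
-- 	return packet
-- ===== Notes on version B (the rewrite author's own statement) =====
-- stated objective: simpler
-- what changed: B is factored into three tiny helpers (shift amount, list rotation by two slices, index-window read) and, instead of A's transpose/shift/transpose passes, rotates the row list of each grid (up/down) and the grid list of the packet (forward/backward) directly and reads the result through the nominal HxL window, so every transposed intermediate disappears.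
import Mathlib
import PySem

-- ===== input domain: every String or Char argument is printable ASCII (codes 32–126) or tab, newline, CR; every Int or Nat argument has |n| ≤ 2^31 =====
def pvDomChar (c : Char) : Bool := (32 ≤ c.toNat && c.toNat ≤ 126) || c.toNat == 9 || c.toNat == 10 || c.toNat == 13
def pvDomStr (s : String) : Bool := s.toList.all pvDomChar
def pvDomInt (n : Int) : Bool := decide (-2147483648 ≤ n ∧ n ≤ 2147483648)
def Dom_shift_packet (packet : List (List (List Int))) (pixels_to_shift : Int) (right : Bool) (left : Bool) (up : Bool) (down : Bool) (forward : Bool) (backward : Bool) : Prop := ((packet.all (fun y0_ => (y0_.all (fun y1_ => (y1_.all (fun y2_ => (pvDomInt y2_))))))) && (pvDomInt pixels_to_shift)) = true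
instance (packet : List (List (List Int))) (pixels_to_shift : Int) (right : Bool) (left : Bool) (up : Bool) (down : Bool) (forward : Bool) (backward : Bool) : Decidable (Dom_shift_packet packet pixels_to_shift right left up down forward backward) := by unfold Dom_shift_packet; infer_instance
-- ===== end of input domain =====

-- B is factored into three helpers (shift amount / rotation by two slices / index-window read) and
-- replaces A's transpose–shift–transpose passes by a direct rotation of the row list (up/down) and of
-- the grid list (forward/backward) read back through the nominal H×L window; objective: simpler.

-- ===== PORT A =====
def shift_packet (packet : List (List (List Int))) (pixels_to_shift : Int) (right : Bool) (left : Bool) (up : Bool) (down : Bool) (forward : Bool) (backward : Bool) : List (List (List Int)) :=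
  if pixels_to_shift = 0 then packet else
  let D : Int := packet.length
  let H : Int := (PySem.List.pyGetD packet 0 []).length
  let L : Int := (PySem.List.pyGetD (PySem.List.pyGetD packet 0 []) 0 []).length
  let packet1 :=
    if right || (left && decide (1 < L)) then
      let p := if pixels_to_shift ≥ L then PySem.Int.mod pixels_to_shift L else pixels_to_shift
      let num := -1 * p
      let num := if right then num else p
      List.foldl (fun np grid =>
        np ++ [List.foldl (fun ng row =>
          ng ++ [PySem.List.slice row (some num) none ++ PySem.List.slice row none (some num)]) [] grid]) [] packet
    else packet
  let packet2 :=
    if up || (down && decide (1 < H)) then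
      let p := if pixels_to_shift ≥ H then PySem.Int.mod pixels_to_shift H else pixels_to_shift
      let num := if up then -1 * p else p
      List.foldl (fun np grid =>
        let t_grid := List.foldl (fun tg x =>
          let t_col := grid.map (fun row => PySem.List.pyGetD row x 0)
          tg ++ [PySem.List.slice t_col (some num) none ++ PySem.List.slice t_col none (some num)]) [] (PySem.List.pyRange 0 L 1)
        let new_grid := List.foldl (fun ng x =>
          ng ++ [t_grid.map (fun t_col => PySem.List.pyGetD t_col x 0)]) [] (PySem.List.pyRange 0 H 1)
        np ++ [new_grid]) [] packet1
    else packet1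
  if forward || (backward && decide (1 < D)) then
    let p := if pixels_to_shift ≥ D then PySem.Int.mod pixels_to_shift D else pixels_to_shift
    let num := if forward then -1 * p else p
    let t_packet := List.foldl (fun tp x =>
      let t_slice := List.foldl (fun ts h =>
        let t_line := (PySem.List.pyRange 0 D 1).map (fun d =>
          PySem.List.pyGetD (PySem.List.pyGetD (PySem.List.pyGetD packet2 d []) h []) x 0)
        ts ++ [PySem.List.slice t_line (some num) none ++ PySem.List.slice t_line none (some num)]) [] (PySem.List.pyRange 0 H 1)
      tp ++ [t_slice]) [] (PySem.List.pyRange 0 L 1)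
    List.foldl (fun np d =>
      let new_grid := List.foldl (fun ng h =>
        ng ++ [(PySem.List.pyRange 0 L 1).map (fun x =>
          PySem.List.pyGetD (PySem.List.pyGetD (PySem.List.pyGetD t_packet x []) h []) d 0)]) [] (PySem.List.pyRange 0 H 1)
      np ++ [new_grid]) [] (PySem.List.pyRange 0 D 1)
  else packet2

-- ===== PORT B =====
-- Source B's helper _amount
def pvAmount (pixels_to_shift size : Int) (neg : Bool) : Int :=
  let n := if pixels_to_shift ≥ size then PySem.Int.mod pixels_to_shift size else pixels_to_shift
  if neg then -n else n

-- Source B's helper _rot: lst[num:] + lst[:num]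
def pvRot {α : Type} (lst : List α) (num : Int) : List α :=
  PySem.List.slice lst (some num) none ++ PySem.List.slice lst none (some num)

-- Source B's helper _window
def pvWindow (grid : List (List Int)) (H L : Int) : List (List Int) :=
  (PySem.List.pyRange 0 H 1).map (fun h =>
    (PySem.List.pyRange 0 L 1).map (fun x =>
      PySem.List.pyGetD (PySem.List.pyGetD grid h []) x 0))

def shift_packet_alt (packet : List (List (List Int))) (pixels_to_shift : Int) (right : Bool) (left : Bool) (up : Bool) (down : Bool) (forward : Bool) (backward : Bool) : List (List (List Int)) :=
  if pixels_to_shift = 0 then packet else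
  let D : Int := packet.length
  let H : Int := (PySem.List.pyGetD packet 0 []).length
  let L : Int := (PySem.List.pyGetD (PySem.List.pyGetD packet 0 []) 0 []).length
  let packet1 :=
    if right || (left && decide (1 < L)) then
      let num := pvAmount pixels_to_shift L right
      packet.map (fun grid => grid.map (fun row => pvRot row num))
    else packet
  let packet2 :=
    if up || (down && decide (1 < H)) then
      let num := pvAmount pixels_to_shift H up
      packet1.map (fun grid => pvWindow (pvRot grid num) H L)
    else packet1
  if forward || (backward && decide (1 < D)) then
    let num := pvAmount pixels_to_shift D forward
    let q := pvRot packet2 num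
    (PySem.List.pyRange 0 D 1).map (fun d => pvWindow (PySem.List.pyGetD q d []) H L)
  else packet2

-- ===== PRECONDITION & SPEC =====
-- Pre_ excludes exactly the inputs on which A raises: for pixels_to_shift ≠ 0, an empty packet or empty
-- first grid (IndexError computing the dimensions), an empty first row with a left/right shift and a
-- positive amount (ZeroDivisionError in %), and grids/rows too short for the index window a running
-- up/down or forward/backward pass reads (IndexError).
def Pre_shift_packet (packet : List (List (List Int))) (pixels_to_shift : Int) (right : Bool) (left : Bool) (up : Bool) (down : Bool) (forward : Bool) (backward : Bool) : Prop :=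
  pixels_to_shift = 0 ∨
    (packet ≠ [] ∧ packet.getD 0 [] ≠ [] ∧
      ((right = true ∨ (left = true ∧ 1 < ((packet.getD 0 []).getD 0 []).length)) →
        (0 < ((packet.getD 0 []).getD 0 []).length ∨ pixels_to_shift < 0)) ∧
      ((up = true ∨ (down = true ∧ 1 < (packet.getD 0 []).length)) →
        (0 < ((packet.getD 0 []).getD 0 []).length →
          ∀ g ∈ packet, (packet.getD 0 []).length ≤ g.length ∧
            ∀ r ∈ g, ((packet.getD 0 []).getD 0 []).length ≤ r.length)) ∧
      (((forward = true ∨ (backward = true ∧ 1 < packet.length)) ∧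
          ¬(up = true ∨ (down = true ∧ 1 < (packet.getD 0 []).length))) →
        (0 < ((packet.getD 0 []).getD 0 []).length →
          ∀ g ∈ packet, (packet.getD 0 []).length ≤ g.length ∧
            ∀ r ∈ g.take (packet.getD 0 []).length,
              ((packet.getD 0 []).getD 0 []).length ≤ r.length)))
instance (packet : List (List (List Int))) (pixels_to_shift : Int) (right : Bool) (left : Bool) (up : Bool) (down : Bool) (forward : Bool) (backward : Bool) : Decidable (Pre_shift_packet packet pixels_to_shift right left up down forward backward) := by unfold Pre_shift_packet; infer_instance

def pvWitness_shift_packet : List (List (List Int)) × Int × Bool × Bool × Bool × Bool × Bool × Bool :=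
  ([[[1, 2], [3, 4]], [[5, 6], [7, 8]]], 1, true, false, true, false, true, false)

def Spec_shift_packet (packet : List (List (List Int))) (pixels_to_shift : Int) (right : Bool) (left : Bool) (up : Bool) (down : Bool) (forward : Bool) (backward : Bool) (out : List (List (List Int))) : Prop := out = shift_packet_alt packet pixels_to_shift right left up down forward backward
instance (packet : List (List (List Int))) (pixels_to_shift : Int) (right : Bool) (left : Bool) (up : Bool) (down : Bool) (forward : Bool) (backward : Bool) (out : List (List (List Int))) : Decidable (Spec_shift_packet packet pixels_to_shift right left up down forward backward out) := by unfold Spec_shift_packet; infer_instance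

-- ===== CLAIM (what is proved, stated in full; the proofs are below) =====
def Claim_equal_shift_packet : Prop := ∀ (packet : List (List (List Int))) (pixels_to_shift : Int) (right : Bool) (left : Bool) (up : Bool) (down : Bool) (forward : Bool) (backward : Bool), Dom_shift_packet packet pixels_to_shift right left up down forward backward → Pre_shift_packet packet pixels_to_shift right left up down forward backward → Spec_shift_packet packet pixels_to_shift right left up down forward backward (shift_packet packet pixels_to_shift right left up down forward backward)

-- ===== LEMMAS AND PROOFS =====

-- A's append-accumulator loops are maps.
theorem pv_foldl_append_map {α β : Type} (f : α → β) (l : List α) (acc : List β) :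
    List.foldl (fun a x => a ++ [f x]) acc l = acc ++ l.map f := by
  induction l generalizing acc with
  | nil => simp
  | cons h t ih => simp [ih]

-- `l[num:] + l[:num]` is a rotation of l (by the clamped index).
theorem pv_rot_eq_rotate {α : Type} (l : List α) (n : Int) :
    PySem.List.slice l (some n) none ++ PySem.List.slice l none (some n)
      = l.rotate (PySem.List.clampIdx l.length n) := by
  have hto : PySem.List.slice l none (some n) = l.take (PySem.List.clampIdx l.length n) := by
    simp [PySem.List.slice, PySem.List.clampIdx]
  rw [PySem.List.slice_some_none, hto,
    List.rotate_eq_drop_append_take (PySem.List.clampIdx_le l.length n)]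

theorem pv_rot_map {α β : Type} (f : α → β) (l : List α) (n : Int) :
    PySem.List.slice (l.map f) (some n) none ++ PySem.List.slice (l.map f) none (some n)
      = (PySem.List.slice l (some n) none ++ PySem.List.slice l none (some n)).map f := by
  rw [pv_rot_eq_rotate, pv_rot_eq_rotate, List.length_map, ← List.map_rotate]

theorem pv_pyGetD_nil {α : Type} (i : Int) (d : α) : PySem.List.pyGetD ([] : List α) i d = d := by
  simp [PySem.List.pyGetD, PySem.List.pyGet?]

theorem pv_getD_map_rows (g : List (List Int)) (x y : Int) :
    PySem.List.pyGetD (g.map (fun row => PySem.List.pyGetD row y 0)) x 0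
      = PySem.List.pyGetD (PySem.List.pyGetD g x []) y 0 := by
  simpa [pv_pyGetD_nil] using
    PySem.List.pyGetD_map (fun row => PySem.List.pyGetD row y 0) g x ([] : List Int)

-- A's up/down transpose–shift–transpose on one grid equals B's window read of the rotated grid.
theorem pv_ud_grid (num H L : Int) (grid : List (List Int)) :
    (PySem.List.pyRange 0 H 1).map (fun x =>
        ((PySem.List.pyRange 0 L 1).map (fun y =>
            PySem.List.slice (grid.map (fun row => PySem.List.pyGetD row y 0)) (some num) none ++
            PySem.List.slice (grid.map (fun row => PySem.List.pyGetD row y 0)) none (some num))).map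
          (fun t_col => PySem.List.pyGetD t_col x 0))
      = (PySem.List.pyRange 0 H 1).map (fun h =>
          (PySem.List.pyRange 0 L 1).map (fun x =>
            PySem.List.pyGetD (PySem.List.pyGetD
              (PySem.List.slice grid (some num) none ++ PySem.List.slice grid none (some num)) h [])
              x 0)) := by
  refine List.map_congr_left (fun x _ => ?_)
  rw [List.map_map]
  refine List.map_congr_left (fun y _ => ?_)
  simp only [Function.comp]
  rw [pv_rot_map]
  exact pv_getD_map_rows _ x y

-- A's forward/backward full-transpose pass equals B's window read of the rotated grid list.
theorem pv_fb (num D H L : Int) (P : List (List (List Int)))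
    (hD : (P.length : Int) = D) :
    ((PySem.List.pyRange 0 D 1).map (fun d => (PySem.List.pyRange 0 H 1).map (fun h => (PySem.List.pyRange 0 L 1).map (fun x => PySem.List.pyGetD (PySem.List.pyGetD (PySem.List.pyGetD ((PySem.List.pyRange 0 L 1).map (fun x => (PySem.List.pyRange 0 H 1).map (fun h => (PySem.List.slice ((PySem.List.pyRange 0 D 1).map (fun d => PySem.List.pyGetD (PySem.List.pyGetD (PySem.List.pyGetD P d []) h []) x 0)) (some num) none ++ PySem.List.slice ((PySem.List.pyRange 0 D 1).map (fun d => PySem.List.pyGetD (PySem.List.pyGetD (PySem.List.pyGetD P d []) h []) x 0)) none (some num))))) x []) h []) d 0))))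
      = (PySem.List.pyRange 0 D 1).map (fun d => (PySem.List.pyRange 0 H 1).map (fun h => (PySem.List.pyRange 0 L 1).map (fun x => PySem.List.pyGetD (PySem.List.pyGetD (PySem.List.pyGetD (PySem.List.slice P (some num) none ++ PySem.List.slice P none (some num)) d []) h []) x 0))) := by
  have hline : ∀ x h : Int,
      (PySem.List.pyRange 0 D 1).map (fun d =>
        PySem.List.pyGetD (PySem.List.pyGetD (PySem.List.pyGetD P d []) h []) x 0)
        = P.map (fun g => PySem.List.pyGetD (PySem.List.pyGetD g h []) x 0) := by
    intro x h
    have base := PySem.List.map_pyGetD_pyRange_zero' P ([] : List (List Int))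
    calc (PySem.List.pyRange 0 D 1).map (fun d =>
            PySem.List.pyGetD (PySem.List.pyGetD (PySem.List.pyGetD P d []) h []) x 0)
        = ((PySem.List.pyRange 0 D 1).map (fun d => PySem.List.pyGetD P d [])).map
            (fun g => PySem.List.pyGetD (PySem.List.pyGetD g h []) x 0) := by
          rw [List.map_map]; rfl
      _ = P.map (fun g => PySem.List.pyGetD (PySem.List.pyGetD g h []) x 0) := by
          rw [← hD, base]
  refine List.map_congr_left (fun d _ => ?_)
  refine List.map_congr_left (fun h hh => ?_)
  refine List.map_congr_left (fun x hx => ?_)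
  obtain ⟨hh0, hh1⟩ := PySem.List.mem_pyRange_one.1 hh
  obtain ⟨hx0, hx1⟩ := PySem.List.mem_pyRange_one.1 hx
  rw [PySem.List.pyGetD_map_pyRange_of_nonneg _ L x ([] : List (List Int)) hx0 hx1,
    PySem.List.pyGetD_map_pyRange_of_nonneg _ H h ([] : List Int) hh0 hh1,
    hline x h, pv_rot_map]
  simpa [pv_pyGetD_nil] using
    PySem.List.pyGetD_map (fun g => PySem.List.pyGetD (PySem.List.pyGetD g h []) x 0)
      (PySem.List.slice P (some num) none ++ PySem.List.slice P none (some num))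
      d ([] : List (List Int))

-- Blocks 2 and 3 of the two programs agree on any packet of the right length.
set_option maxHeartbeats 2000000 in
theorem pv_tail (pixels_to_shift H L D : Int) (up down forward backward : Bool)
    (P : List (List (List Int)))
    (hD : (P.length : Int) = D) :
    (if forward || (backward && decide ((1:Int) < D)) then
      (PySem.List.pyRange 0 D 1).map (fun d => (PySem.List.pyRange 0 H 1).map (fun h => (PySem.List.pyRange 0 L 1).map (fun x => PySem.List.pyGetD (PySem.List.pyGetD (PySem.List.pyGetD ((PySem.List.pyRange 0 L 1).map (fun x => (PySem.List.pyRange 0 H 1).map (fun h => (PySem.List.slice ((PySem.List.pyRange 0 D 1).map (fun d => PySem.List.pyGetD (PySem.List.pyGetD (PySem.List.pyGetD (if up || (down && decide ((1:Int) < H)) then List.map (fun grid => (PySem.List.pyRange 0 H 1).map (fun x => ((PySem.List.pyRange 0 L 1).map (fun y => (PySem.List.slice (List.map (fun row => PySem.List.pyGetD row y 0) grid) (some (if up then -(if pixels_to_shift ≥ H then PySem.Int.mod pixels_to_shift H else pixels_to_shift) else (if pixels_to_shift ≥ H then PySem.Int.mod pixels_to_shift H else pixels_to_shift))) none ++ PySem.List.slice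 (List.map (fun row => PySem.List.pyGetD row y 0) grid) none (some (if up then -(if pixels_to_shift ≥ H then PySem.Int.mod pixels_to_shift H else pixels_to_shift) else (if pixels_to_shift ≥ H then PySem.Int.mod pixels_to_shift H else pixels_to_shift)))))).map (fun t_col => PySem.List.pyGetD t_col x 0))) P else P) d []) h []) x 0)) (some (if forward then -(if pixels_to_shift ≥ D then PySem.Int.mod pixels_to_shift D else pixels_to_shift) else (if pixels_to_shift ≥ D then PySem.Int.mod pixels_to_shift D else pixels_to_shift))) none ++ PySem.List.slice ((PySem.List.pyRange 0 D 1).map (fun d => PySem.List.pyGetD (PySem.List.pyGetD (PySem.List.pyGetD (if up || (down && decide ((1:Int) < H)) then List.map (fun grid => (PySem.List.pyRange 0 H 1).map (fun x => ((PySem.List.pyRange 0 L 1).map (fun y => (PySem.List.slice (List.map (fun row => PySem.List.pyGetD row y 0) grid) (some (if up then -(if pixels_to_shift ≥ H then PySem.Int.mod pixels_to_shift H else pixels_to_shift) else (if pixels_to_shift ≥ H then PySem.Int.mod pixels_to_shift H else pixels_to_shift))) none ++ PySem.List.slice (List.map (fun row => PySem.List.pyGetD row y 0) grid) none (some (if up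 then -(if pixels_to_shift ≥ H then PySem.Int.mod pixels_to_shift H else pixels_to_shift) else (if pixels_to_shift ≥ H then PySem.Int.mod pixels_to_shift H else pixels_to_shift)))))).map (fun t_col => PySem.List.pyGetD t_col x 0))) P else P) d []) h []) x 0)) none (some (if forward then -(if pixels_to_shift ≥ D then PySem.Int.mod pixels_to_shift D else pixels_to_shift) else (if pixels_to_shift ≥ D then PySem.Int.mod pixels_to_shift D else pixels_to_shift))))))) x []) h []) d 0)))
    else (if up || (down && decide ((1:Int) < H)) then List.map (fun grid => (PySem.List.pyRange 0 H 1).map (fun x => ((PySem.List.pyRange 0 L 1).map (fun y => (PySem.List.slice (List.map (fun row => PySem.List.pyGetD row y 0) grid) (some (if up then -(if pixels_to_shift ≥ H then PySem.Int.mod pixels_to_shift H else pixels_to_shift) else (if pixels_to_shift ≥ H then PySem.Int.mod pixels_to_shift H else pixels_to_shift))) none ++ PySem.List.slice (List.map (fun row => PySem.List.pyGetD row y 0) grid) none (some (if up then -(if pixels_to_shift ≥ H then PySem.Int.mod pixels_to_shift H else pixels_to_shift) else (if pixels_to_shift ≥ H then PySem.Int.mod pixels_to_shift H else pixels_to_shift)))))).map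 (fun t_col => PySem.List.pyGetD t_col x 0))) P else P))
    = (if forward || (backward && decide ((1:Int) < D)) then
      (PySem.List.pyRange 0 D 1).map (fun d => (PySem.List.pyRange 0 H 1).map (fun h => (PySem.List.pyRange 0 L 1).map (fun x => PySem.List.pyGetD (PySem.List.pyGetD (PySem.List.pyGetD (PySem.List.slice (if up || (down && decide ((1:Int) < H)) then List.map (fun grid => (PySem.List.pyRange 0 H 1).map (fun h => (PySem.List.pyRange 0 L 1).map (fun x => PySem.List.pyGetD (PySem.List.pyGetD (PySem.List.slice grid (some (if up then -(if pixels_to_shift ≥ H then PySem.Int.mod pixels_to_shift H else pixels_to_shift) else (if pixels_to_shift ≥ H then PySem.Int.mod pixels_to_shift H else pixels_to_shift))) none ++ PySem.List.slice grid none (some (if up then -(if pixels_to_shift ≥ H then PySem.Int.mod pixels_to_shift H else pixels_to_shift) else (if pixels_to_shift ≥ H then PySem.Int.mod pixels_to_shift H else pixels_to_shift)))) h []) x 0))) P else P) (some (if forward then -(if pixels_to_shift ≥ D then PySem.Int.mod pixels_to_shift D else pixels_to_shift) else (if pixels_to_shift ≥ D then PySem.Int.mod pixels_to_shift D else pixels_to_shift)))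 none ++ PySem.List.slice (if up || (down && decide ((1:Int) < H)) then List.map (fun grid => (PySem.List.pyRange 0 H 1).map (fun h => (PySem.List.pyRange 0 L 1).map (fun x => PySem.List.pyGetD (PySem.List.pyGetD (PySem.List.slice grid (some (if up then -(if pixels_to_shift ≥ H then PySem.Int.mod pixels_to_shift H else pixels_to_shift) else (if pixels_to_shift ≥ H then PySem.Int.mod pixels_to_shift H else pixels_to_shift))) none ++ PySem.List.slice grid none (some (if up then -(if pixels_to_shift ≥ H then PySem.Int.mod pixels_to_shift H else pixels_to_shift) else (if pixels_to_shift ≥ H then PySem.Int.mod pixels_to_shift H else pixels_to_shift)))) h []) x 0))) P else P) none (some (if forward then -(if pixels_to_shift ≥ D then PySem.Int.mod pixels_to_shift D else pixels_to_shift) else (if pixels_to_shift ≥ D then PySem.Int.mod pixels_to_shift D else pixels_to_shift)))) d []) h []) x 0)))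
    else (if up || (down && decide ((1:Int) < H)) then List.map (fun grid => (PySem.List.pyRange 0 H 1).map (fun h => (PySem.List.pyRange 0 L 1).map (fun x => PySem.List.pyGetD (PySem.List.pyGetD (PySem.List.slice grid (some (if up then -(if pixels_to_shift ≥ H then PySem.Int.mod pixels_to_shift H else pixels_to_shift) else (if pixels_to_shift ≥ H then PySem.Int.mod pixels_to_shift H else pixels_to_shift))) none ++ PySem.List.slice grid none (some (if up then -(if pixels_to_shift ≥ H then PySem.Int.mod pixels_to_shift H else pixels_to_shift) else (if pixels_to_shift ≥ H then PySem.Int.mod pixels_to_shift H else pixels_to_shift)))) h []) x 0))) P else P)) := by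
  have e2 : (if up || (down && decide ((1:Int) < H)) then List.map (fun grid => (PySem.List.pyRange 0 H 1).map (fun x => ((PySem.List.pyRange 0 L 1).map (fun y => (PySem.List.slice (List.map (fun row => PySem.List.pyGetD row y 0) grid) (some (if up then -(if pixels_to_shift ≥ H then PySem.Int.mod pixels_to_shift H else pixels_to_shift) else (if pixels_to_shift ≥ H then PySem.Int.mod pixels_to_shift H else pixels_to_shift))) none ++ PySem.List.slice (List.map (fun row => PySem.List.pyGetD row y 0) grid) none (some (if up then -(if pixels_to_shift ≥ H then PySem.Int.mod pixels_to_shift H else pixels_to_shift) else (if pixels_to_shift ≥ H then PySem.Int.mod pixels_to_shift H else pixels_to_shift)))))).map (fun t_col => PySem.List.pyGetD t_col x 0))) P else P) = (if up || (down && decide ((1:Int) < H)) then List.map (fun grid => (PySem.List.pyRange 0 H 1).map (fun h => (PySem.List.pyRange 0 L 1).map (fun x => PySem.List.pyGetD (PySem.List.pyGetD (PySem.List.slice grid (some (if up then -(if pixels_to_shift ≥ H then PySem.Int.mod pixels_to_shift H else pixels_to_shift) else (if pixels_to_shift ≥ H then PySem.Int.mod pixels_to_shift H else pixels_to_shift)))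 none ++ PySem.List.slice grid none (some (if up then -(if pixels_to_shift ≥ H then PySem.Int.mod pixels_to_shift H else pixels_to_shift) else (if pixels_to_shift ≥ H then PySem.Int.mod pixels_to_shift H else pixels_to_shift)))) h []) x 0))) P else P) := by
    by_cases h : (up || (down && decide ((1:Int) < H))) = true
    · rw [if_pos h, if_pos h]
      exact List.map_congr_left (fun g _ => pv_ud_grid (if up then -(if pixels_to_shift ≥ H then PySem.Int.mod pixels_to_shift H else pixels_to_shift) else (if pixels_to_shift ≥ H then PySem.Int.mod pixels_to_shift H else pixels_to_shift)) H L g)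
    · rw [if_neg h, if_neg h]
  rw [e2]
  have hD2 : (((if up || (down && decide ((1:Int) < H)) then List.map (fun grid => (PySem.List.pyRange 0 H 1).map (fun h => (PySem.List.pyRange 0 L 1).map (fun x => PySem.List.pyGetD (PySem.List.pyGetD (PySem.List.slice grid (some (if up then -(if pixels_to_shift ≥ H then PySem.Int.mod pixels_to_shift H else pixels_to_shift) else (if pixels_to_shift ≥ H then PySem.Int.mod pixels_to_shift H else pixels_to_shift))) none ++ PySem.List.slice grid none (some (if up then -(if pixels_to_shift ≥ H then PySem.Int.mod pixels_to_shift H else pixels_to_shift) else (if pixels_to_shift ≥ H then PySem.Int.mod pixels_to_shift H else pixels_to_shift)))) h []) x 0))) P else P)).length : Int) = D := by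
    by_cases h : (up || (down && decide ((1:Int) < H))) = true
    · rw [if_pos h, List.length_map]; exact hD
    · rw [if_neg h]; exact hD
  by_cases h3 : (forward || (backward && decide ((1:Int) < D))) = true
  · rw [if_pos h3, if_pos h3]
    exact pv_fb (if forward then -(if pixels_to_shift ≥ D then PySem.Int.mod pixels_to_shift D else pixels_to_shift) else (if pixels_to_shift ≥ D then PySem.Int.mod pixels_to_shift D else pixels_to_shift)) D H L (if up || (down && decide ((1:Int) < H)) then List.map (fun grid => (PySem.List.pyRange 0 H 1).map (fun h => (PySem.List.pyRange 0 L 1).map (fun x => PySem.List.pyGetD (PySem.List.pyGetD (PySem.List.slice grid (some (if up then -(if pixels_to_shift ≥ H then PySem.Int.mod pixels_to_shift H else pixels_to_shift) else (if pixels_to_shift ≥ H then PySem.Int.mod pixels_to_shift H else pixels_to_shift))) none ++ PySem.List.slice grid none (some (if up then -(if pixels_to_shift ≥ H then PySem.Int.mod pixels_to_shift H else pixels_to_shift) else (if pixels_to_shift ≥ H then PySem.Int.mod pixels_to_shift H else pixels_to_shift)))) h []) x 0))) P else P) hD2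
  · rw [if_neg h3, if_neg h3]

-- ===== VERDICT (by name: the statement is the Claim_ definition above) =====
set_option maxHeartbeats 2000000 in
theorem shift_packet_spec : Claim_equal_shift_packet := by
  intro packet pixels_to_shift right left up down forward backward _ _
  unfold Spec_shift_packet
  by_cases hz : pixels_to_shift = 0
  · simp [shift_packet, shift_packet_alt, hz]
  unfold shift_packet shift_packet_alt pvAmount pvRot pvWindow
  rw [if_neg hz, if_neg hz]
  simp only [pv_foldl_append_map, List.nil_append, neg_one_mul]
  refine pv_tail pixels_to_shift _ _ _ up down forward backward _ ?_
  by_cases h : (right || (left && decide ((1:Int) < ((PySem.List.pyGetD (PySem.List.pyGetD packet 0 []) 0 []).length : Int)))) = true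
  · rw [if_pos h, List.length_map]
  · rw [if_neg h]
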